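-- pv_equiv track=rewrite | github.com/bsubercaseaux/BicliqueVA | src/bicliqueVA/utils/data_to_grouped_stacked_time_bars.py | collect_methods
-- ===== SOURCE A (Python) =====
-- from typing import Any
--
-- PREFERRED_ALGO_ORDER = [
--     "original",
--     "bva",
--     "factor",
--     "cpp_bp",
--     "bva_over_bp",
--     "factor_over_bp",
--     "depth_reencode",
-- ]
--
-- def collect_methods(rows: list[dict[str, Any]]) -> list[str]:
--     present: set[str] = set()
--     for row in rows:
--         outcomes = row.get("outcomes", {})
--         for k in outcomes.keys():
--             if k not in {"is_k", "trials"}: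
--                 present.add(k)
--
--     ordered = [m for m in PREFERRED_ALGO_ORDER if m in present]
--     extras = sorted(present - set(ordered))
--     return ordered + extras
-- ===== SOURCE B (Python) =====
-- PREFERRED_ALGO_ORDER = [
--     "original",
--     "bva",
--     "factor",
--     "cpp_bp",
--     "bva_over_bp",
--     "factor_over_bp",
--     "depth_reencode",
-- ]
--
--
-- def collect_methods(rows):
--     present = {
--         k
--         for row in rows
--         for k in row.get("outcomes", {})
--         if k not in ("is_k", "trials")
--     }
--     rank = {m: i for i, m in enumerate(PREFERRED_ALGO_ORDER)}
--     n = len(PREFERRED_ALGO_ORDER)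
--     return sorted(present, key=lambda m: (rank.get(m, n), m))
-- ===== Notes on version B (the rewrite author's own statement) =====
-- stated objective: simpler
-- what changed: B replaces A's partition into preferred-ordered-prefix and sorted-extras followed by concatenation with a single sorted() call whose key is (preference rank or len(PREFERRED_ALGO_ORDER), name), built from one rank dict.
import Mathlib
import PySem

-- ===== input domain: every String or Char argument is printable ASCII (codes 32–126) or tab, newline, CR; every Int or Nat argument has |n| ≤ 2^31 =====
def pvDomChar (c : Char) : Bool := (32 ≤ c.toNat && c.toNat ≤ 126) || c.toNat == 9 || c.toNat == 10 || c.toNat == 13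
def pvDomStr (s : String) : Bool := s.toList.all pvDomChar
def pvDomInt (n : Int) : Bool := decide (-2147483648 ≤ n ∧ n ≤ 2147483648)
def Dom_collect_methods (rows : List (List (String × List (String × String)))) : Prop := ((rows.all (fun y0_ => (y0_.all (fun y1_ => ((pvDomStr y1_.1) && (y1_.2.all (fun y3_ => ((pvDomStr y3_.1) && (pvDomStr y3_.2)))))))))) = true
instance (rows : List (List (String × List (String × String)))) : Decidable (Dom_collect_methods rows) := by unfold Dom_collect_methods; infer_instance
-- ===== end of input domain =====

-- B replaces A's partition-into-ordered-and-sorted-extras-then-concatenate by one keyed sort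
-- (key = (preference rank or len(PREFERRED_ALGO_ORDER), name)); same result, simpler decomposition.

-- ===== PORT A =====
def PREFERRED_ALGO_ORDER : List String :=
  ["original", "bva", "factor", "cpp_bp", "bva_over_bp", "factor_over_bp", "depth_reencode"]

def collect_methods (rows : List (List (String × List (String × String)))) : List String :=
  let present : PySem.Set String :=
    rows.foldl (fun present row =>
      let outcomes := PySem.Dict.getD (PySem.Dict.mk row) "outcomes" ([] : List (String × String))
      (PySem.Dict.keys (PySem.Dict.mk outcomes)).foldl (fun present k =>
        if !(k == "is_k" || k == "trials") then PySem.Set.add present k else present) present)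
      PySem.Set.empty
  let ordered := PREFERRED_ALGO_ORDER.filter (fun m => PySem.Set.contains present m)
  let extras := PySem.List.sorted (PySem.Set.diff present (PySem.Set.ofList ordered)) (fun x => x) false
  ordered ++ extras

-- ===== PORT B =====
def collect_methods_alt (rows : List (List (String × List (String × String)))) : List String :=
  let present : PySem.Set String :=
    PySem.Set.ofList (rows.flatMap (fun row =>
      (PySem.Dict.keys (PySem.Dict.mk (PySem.Dict.getD (PySem.Dict.mk row) "outcomes" ([] : List (String × String))))).filter
        (fun k => !(k == "is_k" || k == "trials"))))
  let rank : PySem.Dict String Int :=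
    (PySem.List.enumerate PREFERRED_ALGO_ORDER).foldl (fun d p => PySem.Dict.insert d p.2 p.1) (PySem.Dict.mk [])
  let n : Int := (PREFERRED_ALGO_ORDER.length : Int)
  PySem.List.sorted2 present (fun m => PySem.Dict.getD rank m n) (fun m => m) false

-- ===== PRECONDITION & SPEC =====
def Spec_collect_methods (rows : List (List (String × List (String × String)))) (out : List String) : Prop := out = collect_methods_alt rows
instance (rows : List (List (String × List (String × String)))) (out : List String) : Decidable (Spec_collect_methods rows out) := by unfold Spec_collect_methods; infer_instance

-- ===== CLAIM (what is proved, stated in full; the proofs are below) =====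
def Claim_equal_collect_methods : Prop := ∀ (rows : List (List (String × List (String × String)))), Dom_collect_methods rows → Spec_collect_methods rows (collect_methods rows)

-- ===== LEMMAS AND PROOFS =====

-- the list of method names A and B both draw their set from
def pvKeyList (rows : List (List (String × List (String × String)))) : List String :=
  rows.flatMap (fun row =>
    (PySem.Dict.keys (PySem.Dict.mk (PySem.Dict.getD (PySem.Dict.mk row) "outcomes" ([] : List (String × String))))).filter
      (fun k => !(k == "is_k" || k == "trials")))

-- B's rank function, with the dict literal folded away
def pvRank (m : String) : Int :=
  PySem.Dict.getD
    ((PySem.List.enumerate PREFERRED_ALGO_ORDER).foldl (fun d p => PySem.Dict.insert d p.2 p.1) (PySem.Dict.mk []))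
    m ((PREFERRED_ALGO_ORDER.length : Nat) : Int)

def pvKey (m : String) : Lex (Int × String) := toLex (pvRank m, m)

-- A's present-set accumulation is set(pvKeyList rows)
lemma presentA_eq (rows : List (List (String × List (String × String)))) :
    rows.foldl (fun present row =>
      let outcomes := PySem.Dict.getD (PySem.Dict.mk row) "outcomes" ([] : List (String × String))
      (PySem.Dict.keys (PySem.Dict.mk outcomes)).foldl (fun present k =>
        if !(k == "is_k" || k == "trials") then PySem.Set.add present k else present) present)
      PySem.Set.empty
    = PySem.Set.ofList (pvKeyList rows) := by
  rw [PySem.Set.ofList_eq_foldl, pvKeyList, List.foldl_flatMap]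
  simp only [List.foldl_filter, PySem.Set.empty]

-- sorted2 with key pair (r m, m) is sorted with the lexicographic key
lemma sorted2_eq_sorted_lex (xs : List String) (r : String → Int) :
    PySem.List.sorted2 xs r (fun m => m) false
      = PySem.List.sorted xs (fun m => toLex (r m, m)) false := by
  rw [PySem.List.sorted_eq_foldl_insertBy]
  unfold PySem.List.sorted2
  simp only [if_neg (by decide : ¬ (false = true))]
  congr 1
  funext acc x
  congr 1
  funext a b
  have hlex : (toLex (r a, a) < toLex (r b, b)) ↔ (r a < r b ∨ r a = r b ∧ a < b) := Prod.Lex.lt_iff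
  rcases lt_trichotomy (r a) (r b) with h | h | h
  · simp [hlex, h, not_lt.2 (le_of_lt h)]
  · simp [h]
    rw [Prod.Lex.lt_iff]
    simp [String.lt_iff_toList_lt]
  · simp [hlex, h, not_lt.2 (le_of_lt h), h.ne']

lemma pvRank_not_mem (m : String) (h : m ∉ PREFERRED_ALGO_ORDER) : pvRank m = 7 := by
  simp [PREFERRED_ALGO_ORDER] at h
  obtain ⟨h1, h2, h3, h4, h5, h6, h7⟩ := h
  simp only [pvRank, PREFERRED_ALGO_ORDER, PySem.List.enumerate, PySem.Dict.insert,
    PySem.Dict.getD, PySem.Dict.get?]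
  rw [List.find?_eq_none.mpr]
  · rfl
  · intro p hp
    simp at hp
    rcases hp with rfl | rfl | rfl | rfl | rfl | rfl | rfl <;>
      simp [beq_iff_eq, Ne.symm h1, Ne.symm h2, Ne.symm h3, Ne.symm h4, Ne.symm h5, Ne.symm h6,
        Ne.symm h7]

-- main combinatorial lemma: for a nodup P, the single lex sort equals A's partition
lemma main_lemma (P : List String) (hP : P.Nodup) :
    PySem.List.sorted P pvKey false
      = PREFERRED_ALGO_ORDER.filter (fun m => PySem.Set.contains P m)
        ++ PySem.List.sorted
            (PySem.Set.diff P (PySem.Set.ofList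
              (PREFERRED_ALGO_ORDER.filter (fun m => PySem.Set.contains P m))))
            (fun x => x) false := by
  set ordered := PREFERRED_ALGO_ORDER.filter (fun m => PySem.Set.contains P m) with hordered
  set D := PySem.Set.diff P (PySem.Set.ofList ordered) with hD
  set extras := PySem.List.sorted D (fun x => x) false with hextras
  have hpn : PREFERRED_ALGO_ORDER.Nodup := by decide
  have hlt7 : ∀ m ∈ PREFERRED_ALGO_ORDER, pvRank m < 7 := by decide
  have hordnd : ordered.Nodup := hpn.filter _
  have hmemord : ∀ x, x ∈ ordered ↔ x ∈ PREFERRED_ALGO_ORDER ∧ x ∈ P := by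
    intro x
    simp [hordered, List.mem_filter, PySem.Set.contains]
  have hmemD : ∀ x, x ∈ D ↔ x ∈ P ∧ x ∉ PREFERRED_ALGO_ORDER := by
    intro x
    simp only [hD, PySem.Set.diff, List.mem_filter, Bool.not_eq_eq_eq_not, Bool.not_true,
      PySem.Set.contains]
    constructor
    · rintro ⟨hxP, hc⟩
      refine ⟨hxP, fun hpref => ?_⟩
      have : x ∈ PySem.Set.ofList ordered := (PySem.Set.mem_ofList _ _).mpr ((hmemord x).mpr ⟨hpref, hxP⟩)
      simp [this] at hc
    · rintro ⟨hxP, hnp⟩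
      refine ⟨hxP, ?_⟩
      simp [PySem.Set.mem_ofList, hmemord x, hnp]
  have hDnd : D.Nodup := hP.filter _
  have hext_perm : extras.Perm D := PySem.List.sorted_perm _ _ _
  have hextnd : extras.Nodup := hext_perm.nodup_iff.mpr hDnd
  -- permutation
  have hperm : (ordered ++ extras).Perm P := by
    have hfc : List.filter (fun x => !(PySem.Set.ofList ordered).contains x) P
        = List.filter (fun x => !PREFERRED_ALGO_ORDER.contains x) P := by
      apply List.filter_congr
      intro x hxP
      simp only [Bool.not_eq_eq_eq_not]
      simp [hmemord x, hxP]
    have h1 : ordered.Perm (List.filter (fun x => PREFERRED_ALGO_ORDER.contains x) P) := by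
      rw [List.perm_ext_iff_of_nodup hordnd (hP.filter _)]
      intro a
      simp [hmemord a, List.mem_filter, and_comm]
    have h2 : extras.Perm (List.filter (fun x => !PREFERRED_ALGO_ORDER.contains x) P) := by
      refine hext_perm.trans ?_
      rw [hD, PySem.Set.diff, hfc]
    exact (h1.append h2).trans (List.filter_append_perm _ _)
  -- pairwise
  have hpair : List.Pairwise (fun a b => pvKey a < pvKey b) (ordered ++ extras) := by
    rw [List.pairwise_append]
    refine ⟨?_, ?_, ?_⟩
    · have hpp : List.Pairwise (fun a b => pvRank a < pvRank b) PREFERRED_ALGO_ORDER := by decide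
      have := hpp.sublist (List.filter_sublist (l := PREFERRED_ALGO_ORDER)
        (p := fun m => PySem.Set.contains P m))
      exact this.imp (fun h => Prod.Lex.lt_iff.mpr (Or.inl (by simpa [pvKey] using h)))
    · have hle := PySem.List.sorted_pairwise D (fun x => x)
      have hstrict : List.Pairwise (fun a b : String => a < b) extras :=
        (hle.and hextnd).imp (fun ⟨h1, h2⟩ => lt_of_le_of_ne h1 h2)
      refine hstrict.imp_of_mem (fun {a b} ha hb hab => ?_)
      have hra : pvRank a = 7 :=
        pvRank_not_mem a ((hmemD a).mp (hext_perm.mem_iff.mp ha)).2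
      have hrb : pvRank b = 7 :=
        pvRank_not_mem b ((hmemD b).mp (hext_perm.mem_iff.mp hb)).2
      exact Prod.Lex.lt_iff.mpr (Or.inr ⟨by simp [pvKey, hra, hrb], hab⟩)
    · intro a ha b hb
      have hra : pvRank a < 7 := hlt7 a ((hmemord a).mp ha).1
      have hrb : pvRank b = 7 :=
        pvRank_not_mem b ((hmemD b).mp (hext_perm.mem_iff.mp hb)).2
      exact Prod.Lex.lt_iff.mpr (Or.inl (by simp only [pvKey, ofLex_toLex]; omega))
  exact PySem.List.sorted_eq_of_perm_of_pairwise_lt P (ordered ++ extras) pvKey hperm hpair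


-- ===== VERDICT (by name: the statement is the Claim_ definition above) =====
theorem collect_methods_spec : Claim_equal_collect_methods := by
  intro rows _
  unfold Spec_collect_methods collect_methods collect_methods_alt
  rw [presentA_eq, sorted2_eq_sorted_lex]
  exact (main_lemma _ (PySem.Set.nodup_ofList _)).symm
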